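-- pv_equiv track=rewrite | github.com/andy-bio/genetic-interactions | my_methods.py | represent_network
-- ===== SOURCE A (Python) =====
-- def represent_network(gene_list, dic, dist=0):
--     dic0 = dict(filter(lambda x: x[0] in gene_list, dic.items()))
--     dic_f = {}
--     for k in dic0.keys():
--         dic_f[k] = dict(filter(lambda x: x[0] in gene_list, dic0[k].items()))
--     if dist==1:
--         proc = list(dic0.keys())
--         for gene in proc: # gene es un gen del procesoma
--             proc = list(dic0.keys())
--             interactors = list(dic[gene].keys()) # todos los genes que interactuan con gene
--             interactors = list(filter(lambda x: x not in proc, interactors)) # me quedo con los que no estan en proc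
--             proc.remove(gene)
--             for i in interactors: # i es cada interactor de gene
--                 if len(set(dic[i].keys()).intersection(set(proc)))>0:
--                     dic_f[i] = dict(filter(lambda x: x[0] in dic0.keys(), dic[i].items()))
--                     for j in dic_f[i].keys():
--                         dic_f[j][i] = dic[i][j]
--     return dic_f
-- ===== SOURCE B (Python) =====
-- def represent_network(gene_list, dic, dist=0):
--     core = [k for k in dic if k in gene_list]
--     cs = set(core)
--     if dist != 1:
--         return {k: {n: w for n, w in dic[k].items() if n in gene_list} for k in core}
--     # pass 1: which non-core genes become bridge nodes, in first-acceptance order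
--     order = []
--     for g in core:
--         for i in dic[g]:
--             if i in cs or i in order:
--                 continue
--             if any(j != g for j in dic[i] if j in cs):
--                 order.append(i)
--     # pass 2: assemble every output row directly from dic and `order`
--     out = {}
--     for j in core:
--         row = {n: w for n, w in dic[j].items() if n in gene_list}
--         for i in order:
--             if j in dic[i]:
--                 row[i] = dic[i][j]
--         out[j] = row
--     for i in order:
--         out[i] = {j: w for j, w in dic[i].items() if j in cs}
--     return out
-- ===== Notes on version B (the rewrite author's own statement) =====
-- stated objective: alternative
-- what changed: B replaces A's single mutating sweep (which grows dic_f in place and patches symmetric edges as it scans) by two independent declarative passes: pass 1 only computes the list of accepted bridge genes in first-acceptance order, pass 2 then assembles every output row directly from dic and that list, so no dictionary is ever updated after being built and A's redundant re-assignments and per-gene proc rebuilding disappear.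
import Mathlib
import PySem

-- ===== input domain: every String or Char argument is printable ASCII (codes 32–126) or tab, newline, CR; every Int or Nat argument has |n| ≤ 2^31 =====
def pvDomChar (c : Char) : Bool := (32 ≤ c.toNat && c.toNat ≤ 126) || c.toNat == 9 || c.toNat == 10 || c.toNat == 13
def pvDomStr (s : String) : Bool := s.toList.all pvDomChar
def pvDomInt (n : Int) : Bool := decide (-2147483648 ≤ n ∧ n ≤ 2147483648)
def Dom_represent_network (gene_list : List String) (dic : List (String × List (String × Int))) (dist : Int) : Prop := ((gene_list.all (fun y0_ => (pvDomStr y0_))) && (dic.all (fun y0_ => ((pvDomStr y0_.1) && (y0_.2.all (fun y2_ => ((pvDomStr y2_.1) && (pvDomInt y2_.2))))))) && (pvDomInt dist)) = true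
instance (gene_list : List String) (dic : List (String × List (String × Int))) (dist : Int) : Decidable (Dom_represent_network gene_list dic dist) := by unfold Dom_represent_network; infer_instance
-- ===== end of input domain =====

-- B builds the subnetwork in two declarative passes (bridge-acceptance list first, then each output row
-- assembled independently) instead of A's single in-place mutating sweep with per-gene proc rebuilding.


-- shared input decoding (the Python argument `dic` is a dict of dicts)
def pvDic (dic : List (String × List (String × Int))) : PySem.Dict String (PySem.Dict String Int) :=
  PySem.Dict.ofList (dic.map (fun p => (p.1, PySem.Dict.ofList p.2)))

-- ===== PORT A =====
-- dic0 = dict(filter(lambda x: x[0] in gene_list, dic.items()))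
def pvDic0 (gene_list : List String) (dic : List (String × List (String × Int))) : PySem.Dict String (PySem.Dict String Int) :=
  PySem.Dict.ofList ((pvDic dic).items.filter (fun x => gene_list.contains x.1))

-- inner loop: for j in dic_f[i].keys(): dic_f[j][i] = dic[i][j]
def pvAJ (dicD : PySem.Dict String (PySem.Dict String Int)) (i : String)
    (df2 : PySem.Dict String (PySem.Dict String Int)) (j : String) : PySem.Dict String (PySem.Dict String Int) :=
  df2.insert j ((df2.getD j PySem.Dict.empty).insert i ((dicD.getD i PySem.Dict.empty).getD j 0))

-- body of `for i in interactors`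
def pvAI (gene_list : List String) (dic : List (String × List (String × Int))) (proc : List String)
    (df : PySem.Dict String (PySem.Dict String Int)) (i : String) : PySem.Dict String (PySem.Dict String Int) :=
  if 0 < (PySem.Set.inter (PySem.Set.ofList ((pvDic dic).getD i PySem.Dict.empty).keys) (PySem.Set.ofList proc)).length then
    let vi := PySem.Dict.ofList (((pvDic dic).getD i PySem.Dict.empty).items.filter (fun x => (pvDic0 gene_list dic).contains x.1))
    vi.keys.foldl (pvAJ (pvDic dic) i) (df.insert i vi)
  else df

-- body of `for gene in proc`; proc.remove(gene) = List.erase (gene occurs once in proc)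
def pvAG (gene_list : List String) (dic : List (String × List (String × Int)))
    (df : PySem.Dict String (PySem.Dict String Int)) (gene : String) : PySem.Dict String (PySem.Dict String Int) :=
  (((pvDic dic).getD gene PySem.Dict.empty).keys.filter (fun x => !(pvDic0 gene_list dic).keys.contains x)).foldl
    (pvAI gene_list dic ((pvDic0 gene_list dic).keys.erase gene)) df

def represent_network (gene_list : List String) (dic : List (String × List (String × Int))) (dist : Int) : List (String × List (String × Int)) :=
  let dicf0 : PySem.Dict String (PySem.Dict String Int) :=
    (pvDic0 gene_list dic).keys.foldl (fun df k =>
      df.insert k (PySem.Dict.ofList (((pvDic0 gene_list dic).getD k PySem.Dict.empty).items.filter (fun x => gene_list.contains x.1)))) PySem.Dict.empty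
  let dicf :=
    if dist == 1 then (pvDic0 gene_list dic).keys.foldl (pvAG gene_list dic) dicf0
    else dicf0
  dicf.items.map (fun p => (p.1, p.2.items))

-- ===== PORT B =====
-- core = [k for k in dic if k in gene_list]
def pvCore (gene_list : List String) (dic : List (String × List (String × Int))) : List String :=
  (pvDic dic).keys.filter (fun k => gene_list.contains k)

-- {n: w for n, w in dic[k].items() if n in gene_list}
def pvBase (gene_list : List String) (dic : List (String × List (String × Int))) (k : String) : PySem.Dict String Int :=
  PySem.Dict.ofList (((pvDic dic).getD k PySem.Dict.empty).items.filter (fun p => gene_list.contains p.1))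

-- the generator `j for j in dic[i] if j in cs`
def pvT (gene_list : List String) (dic : List (String × List (String × Int))) (i : String) : List String :=
  ((pvDic dic).getD i PySem.Dict.empty).keys.filter (fun j => (PySem.Set.ofList (pvCore gene_list dic)).contains j)

-- pass-1 body: for i in dic[g]
def pvP1I (gene_list : List String) (dic : List (String × List (String × Int))) (g : String)
    (order : List String) (i : String) : List String :=
  if (PySem.Set.ofList (pvCore gene_list dic)).contains i || order.contains i then order
  else if (pvT gene_list dic i).any (fun j => j != g) then order ++ [i] else order

-- pass-2 core row: row = base; for i in order: if j in dic[i]: row[i] = dic[i][j]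
def pvRStep (dic : List (String × List (String × Int))) (j : String)
    (r : PySem.Dict String Int) (i : String) : PySem.Dict String Int :=
  if ((pvDic dic).getD i PySem.Dict.empty).contains j then
    r.insert i (((pvDic dic).getD i PySem.Dict.empty).getD j 0)
  else r

def pvRow (gene_list : List String) (dic : List (String × List (String × Int)))
    (order : List String) (j : String) : PySem.Dict String Int :=
  order.foldl (pvRStep dic j) (pvBase gene_list dic j)

-- pass-2 bridge row: {j: w for j, w in dic[i].items() if j in cs}
def pvBridgeRow (gene_list : List String) (dic : List (String × List (String × Int))) (i : String) : PySem.Dict String Int :=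
  PySem.Dict.ofList (((pvDic dic).getD i PySem.Dict.empty).items.filter
    (fun p => (PySem.Set.ofList (pvCore gene_list dic)).contains p.1))

def represent_network_alt (gene_list : List String) (dic : List (String × List (String × Int))) (dist : Int) : List (String × List (String × Int)) :=
  if dist ≠ 1 then
    (((pvCore gene_list dic).foldl (fun d k => d.insert k (pvBase gene_list dic k)) PySem.Dict.empty).items.map
      (fun p => (p.1, p.2.items)))
  else
    let order := (pvCore gene_list dic).foldl
      (fun o g => ((pvDic dic).getD g PySem.Dict.empty).keys.foldl (pvP1I gene_list dic g) o) []
    let out := (pvCore gene_list dic).foldl (fun d j => d.insert j (pvRow gene_list dic order j)) PySem.Dict.empty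
    let out2 := order.foldl (fun d i => d.insert i (pvBridgeRow gene_list dic i)) out
    out2.items.map (fun p => (p.1, p.2.items))

-- ===== PRECONDITION & SPEC =====
-- Pre_ excludes exactly the inputs where Python A raises KeyError: dist == 1 and some gene_list-selected
-- key of dic has a neighbour that is not itself a key of dic (A evaluates dic[i] for it).
def Pre_represent_network (gene_list : List String) (dic : List (String × List (String × Int))) (dist : Int) : Prop :=
  dist = 1 → ∀ p ∈ (PySem.Dict.ofList dic).items, gene_list.contains p.1 = true →
    ∀ q ∈ p.2, (PySem.Dict.ofList dic).contains q.1 = true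
instance (gene_list : List String) (dic : List (String × List (String × Int))) (dist : Int) : Decidable (Pre_represent_network gene_list dic dist) := by unfold Pre_represent_network; infer_instance

def pvWitness_represent_network : List String × (List (String × List (String × Int))) × Int :=
  (["a", "b"], [("a", [("x", 1)]), ("b", [("x", 2)]), ("x", [("a", 1), ("b", 2)])], 1)

def Spec_represent_network (gene_list : List String) (dic : List (String × List (String × Int))) (dist : Int) (out : List (String × List (String × Int))) : Prop := out = represent_network_alt gene_list dic dist
instance (gene_list : List String) (dic : List (String × List (String × Int))) (dist : Int) (out : List (String × List (String × Int))) : Decidable (Spec_represent_network gene_list dic dist out) := by unfold Spec_represent_network; infer_instance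

-- ===== CLAIM (what is proved, stated in full; the proofs are below) =====
def Claim_equal_represent_network : Prop := ∀ (gene_list : List String) (dic : List (String × List (String × Int))) (dist : Int), Dom_represent_network gene_list dic dist → Pre_represent_network gene_list dic dist → Spec_represent_network gene_list dic dist (represent_network gene_list dic dist)

-- ===== LEMMAS AND PROOFS =====
theorem pv_ofList_items {κ ν : Type} [BEq κ] [LawfulBEq κ] (l : List (κ × ν))
    (h : (l.map (·.1)).Nodup) : (PySem.Dict.ofList l).items = l := by
  have := PySem.Dict.items_foldl_insert_fresh (d := PySem.Dict.empty) (l := l) (k := (·.1)) (v := (·.2)) (by simp [PySem.Dict.contains_empty]) h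
  simpa [PySem.Dict.ofList, PySem.Dict.update] using this

theorem pv_mem_items_update {κ ν : Type} [BEq κ] [LawfulBEq κ] (l : List (κ × ν)) :
    ∀ (d : PySem.Dict κ ν) p, p ∈ (d.update l).items → p ∈ d.items ∨ p ∈ l := by
  induction l with
  | nil => intro d p h; exact Or.inl (by simpa [PySem.Dict.update] using h)
  | cons x xs ih =>
    intro d p h
    have h' : p ∈ ((d.insert x.1 x.2).update xs).items := by
      simpa [PySem.Dict.update] using h
    rcases ih (d.insert x.1 x.2) p h' with h2 | h2
    · rcases (PySem.Dict.mem_items_insert _ _ _ _).1 h2 with h3 | h3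
      · right; simp [h3]
      · exact Or.inl h3.1
    · right; exact List.mem_cons_of_mem _ h2

theorem pv_mem_items_ofList {κ ν : Type} [BEq κ] [LawfulBEq κ] (l : List (κ × ν)) (p : κ × ν)
    (h : p ∈ (PySem.Dict.ofList l).items) : p ∈ l := by
  rcases pv_mem_items_update l PySem.Dict.empty p h with h2 | h2
  · simp [PySem.Dict.empty] at h2
  · exact h2

theorem pv_insert_same {κ ν : Type} [BEq κ] [LawfulBEq κ] (d : PySem.Dict κ ν) (k : κ) (v : ν)
    (hnd : d.keys.Nodup) (h : d.get? k = some v) : d.insert k v = d := by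
  have hc : d.contains k = true := by
    rw [PySem.Dict.contains_eq_isSome_get?, h]; rfl
  apply PySem.Dict.ext
  rw [PySem.Dict.items_insert_of_contains _ _ hc]
  have : ∀ p ∈ d.items, (fun p : κ × ν => if (p.1 == k) = true then (k, v) else p) p = p := by
    intro p hp
    by_cases hk : (p.1 == k) = true
    · have hk' : p.1 = k := by simpa using hk
      have : d.get? p.1 = some p.2 := PySem.Dict.get?_of_mem_items d (by exact (Prod.mk.eta ▸ hp)) hnd
      rw [hk'] at this; rw [this] at h
      have hv : v = p.2 := (Option.some_injective _ h).symm
      simp [← hk', hv]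
    · simp [hk]
  calc List.map (fun p : κ × ν => if (p.1 == k) = true then (k, v) else p) d.items
      = List.map id d.items := List.map_congr_left (fun p hp => this p hp)
    _ = d.items := List.map_id _

-- find? over a filter that keeps everything matching the key
theorem pv_find?_filter {ν : Type} (l : List (String × ν)) (c : String → Bool) (k : String)
    (hk : c k = true) :
    (l.filter (fun x => c x.1)).find? (fun p => p.1 == k) = l.find? (fun p => p.1 == k) := by
  induction l with
  | nil => rfl
  | cons a l ih =>
    by_cases ha : (a.1 == k) = true
    · have ha' : a.1 = k := by simpa using ha
      have hca : c a.1 = true := by rw [ha']; exact hk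
      simp [hca, ha]
    · by_cases hca : c a.1 = true
      · simp [hca, ha, ih]
      · simp [hca, ha, ih]

theorem pv_keysD_nodup (dic : List (String × List (String × Int))) : (pvDic dic).keys.Nodup :=
  PySem.Dict.nodup_keys_ofList _

theorem pv_items0 (gene_list : List String) (dic : List (String × List (String × Int))) :
    (pvDic0 gene_list dic).items = (pvDic dic).items.filter (fun x => gene_list.contains x.1) := by
  apply pv_ofList_items
  have hsub : List.Sublist (((pvDic dic).items.filter (fun x => gene_list.contains x.1)).map (·.1)) ((pvDic dic).keys) :=
    ((pvDic dic).items.filter_sublist).map (·.1)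
  exact (pv_keysD_nodup dic).sublist hsub

theorem pv_keys0 (gene_list : List String) (dic : List (String × List (String × Int))) :
    (pvDic0 gene_list dic).keys = pvCore gene_list dic := by
  show (pvDic0 gene_list dic).items.map (·.1) = ((pvDic dic).items.map (·.1)).filter (fun k => gene_list.contains k)
  rw [pv_items0, List.filter_map]
  rfl

theorem pv_core_nodup (gene_list : List String) (dic : List (String × List (String × Int))) :
    (pvCore gene_list dic).Nodup :=
  (pv_keysD_nodup dic).filter _

theorem pv_get0 (gene_list : List String) (dic : List (String × List (String × Int))) (k : String)
    (hk : gene_list.contains k = true) :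
    (pvDic0 gene_list dic).get? k = (pvDic dic).get? k := by
  show ((pvDic0 gene_list dic).items.find? (fun p => p.1 == k)).map (·.2) = ((pvDic dic).items.find? (fun p => p.1 == k)).map (·.2)
  rw [pv_items0, pv_find?_filter _ _ _ hk]

theorem pv_innerNodup (dic : List (String × List (String × Int))) (i : String) :
    ((pvDic dic).getD i PySem.Dict.empty).keys.Nodup := by
  rw [PySem.Dict.getD_eq_get?_getD]
  cases hg : (pvDic dic).get? i with
  | none => simp [PySem.Dict.empty, PySem.Dict.keys]
  | some v =>
    have hmem := PySem.Dict.mem_items_of_get?_eq_some _ hg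
    have hmem2 := pv_mem_items_ofList _ _ hmem
    simp only [List.mem_map] at hmem2
    obtain ⟨q, _, hq⟩ := hmem2
    have : v = PySem.Dict.ofList q.2 := (Prod.mk.injEq _ _ _ _ ▸ hq).2.symm ▸ rfl
    simp only [Option.getD_some]
    cases hq
    exact PySem.Dict.nodup_keys_ofList _

-- neighbour dict of i (proof-side abbreviation)
def pvW (dic : List (String × List (String × Int))) (i : String) : PySem.Dict String Int :=
  (pvDic dic).getD i PySem.Dict.empty

-- A's inserted dict for an accepted bridge neighbour i
def pvV (gene_list : List String) (dic : List (String × List (String × Int))) (i : String) : PySem.Dict String Int :=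
  PySem.Dict.ofList ((pvW dic i).items.filter (fun x => (pvDic0 gene_list dic).contains x.1))

theorem pv_contains0_eq (gene_list : List String) (dic : List (String × List (String × Int))) (j : String) :
    (pvDic0 gene_list dic).contains j = (PySem.Set.ofList (pvCore gene_list dic)).contains j := by
  rw [Bool.eq_iff_iff, PySem.Dict.contains_iff_mem_keys, pv_keys0, PySem.Set.contains_iff, PySem.Set.mem_ofList]

theorem pv_bridgeRow_eq_V (gene_list : List String) (dic : List (String × List (String × Int))) (i : String) :
    pvBridgeRow gene_list dic i = pvV gene_list dic i := by
  unfold pvBridgeRow pvV pvW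
  congr 1
  exact List.filter_congr (fun p _ => (pv_contains0_eq gene_list dic p.1).symm)

theorem pv_V_items (gene_list : List String) (dic : List (String × List (String × Int))) (i : String) :
    (pvV gene_list dic i).items = (pvW dic i).items.filter (fun x => (pvDic0 gene_list dic).contains x.1) := by
  apply pv_ofList_items
  have hsub : List.Sublist (((pvW dic i).items.filter (fun x => (pvDic0 gene_list dic).contains x.1)).map (fun x => x.1)) ((pvW dic i).keys) :=
    ((pvW dic i).items.filter_sublist).map (fun x => x.1)
  exact (pv_innerNodup dic i).sublist hsub

theorem pv_V_keys (gene_list : List String) (dic : List (String × List (String × Int))) (i : String) :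
    (pvV gene_list dic i).keys = pvT gene_list dic i := by
  have h0 : (pvV gene_list dic i).keys = ((pvW dic i).items.filter (fun x => (pvDic0 gene_list dic).contains x.1)).map (fun x => x.1) := by
    show List.map (fun x => x.1) (pvV gene_list dic i).items = _
    rw [pv_V_items]
  unfold pvT
  rw [h0]
  simp only [pv_contains0_eq]
  show _ = List.filter _ (List.map (fun x => x.1) (pvW dic i).items)
  exact (List.filter_map (f := fun x : String × Int => x.1)
    (p := fun j => (PySem.Set.ofList (pvCore gene_list dic)).contains j) (l := (pvW dic i).items)).symm

theorem pv_mem_T_iff (gene_list : List String) (dic : List (String × List (String × Int))) (i j : String) :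
    j ∈ pvT gene_list dic i ↔ j ∈ (pvW dic i).keys ∧ j ∈ pvCore gene_list dic := by
  unfold pvT
  rw [List.mem_filter, PySem.Set.contains_iff, PySem.Set.mem_ofList]
  rfl

theorem pv_T_nodup (gene_list : List String) (dic : List (String × List (String × Int))) (i : String) :
    (pvT gene_list dic i).Nodup :=
  (pv_innerNodup dic i).filter _

theorem pv_cond_iff (gene_list : List String) (dic : List (String × List (String × Int))) (i gene : String) :
    (0 < (PySem.Set.inter (PySem.Set.ofList ((pvDic dic).getD i PySem.Dict.empty).keys)
        (PySem.Set.ofList ((pvDic0 gene_list dic).keys.erase gene))).length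
      ↔ (pvT gene_list dic i).any (fun j => j != gene) = true) := by
  rw [List.length_pos_iff_exists_mem, List.any_eq_true]
  constructor
  · rintro ⟨x, hx⟩
    rw [PySem.Set.mem_inter, PySem.Set.mem_ofList, PySem.Set.mem_ofList] at hx
    obtain ⟨h1, h2⟩ := hx
    rw [pv_keys0, (pv_core_nodup gene_list dic).mem_erase_iff] at h2
    refine ⟨x, ?_, by simpa using h2.1⟩
    exact (pv_mem_T_iff gene_list dic i x).2 ⟨h1, h2.2⟩
  · rintro ⟨j, hj, hne⟩
    obtain ⟨h1, h2⟩ := (pv_mem_T_iff gene_list dic i j).1 hj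
    refine ⟨j, ?_⟩
    rw [PySem.Set.mem_inter, PySem.Set.mem_ofList, PySem.Set.mem_ofList, pv_keys0,
      (pv_core_nodup gene_list dic).mem_erase_iff]
    exact ⟨h1, by simpa using hne, h2⟩

-- J1: the j-fold does not touch entries outside t
theorem pv_jfold_get?_not_mem (dic : List (String × List (String × Int))) (i : String) :
    ∀ (t : List String) (d : PySem.Dict String (PySem.Dict String Int)) (y : String), y ∉ t →
      (t.foldl (pvAJ (pvDic dic) i) d).get? y = d.get? y := by
  intro t
  induction t with
  | nil => intro d y _; rfl
  | cons a t ih =>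
    intro d y hy
    rw [List.foldl_cons, ih _ _ (fun h => hy (List.mem_cons_of_mem _ h))]
    exact PySem.Dict.get?_insert_of_ne _ _ (fun h => hy (h ▸ List.mem_cons_self))

-- J2: entry j ∈ t after the j-fold
theorem pv_jfold_get?_mem (dic : List (String × List (String × Int))) (i : String) :
    ∀ (t : List String) (d : PySem.Dict String (PySem.Dict String Int)) (j : String), t.Nodup → j ∈ t →
      (t.foldl (pvAJ (pvDic dic) i) d).get? j
        = some ((d.getD j PySem.Dict.empty).insert i (((pvDic dic).getD i PySem.Dict.empty).getD j 0)) := by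
  intro t
  induction t with
  | nil => intro d j _ h; cases h
  | cons a t ih =>
    intro d j hnd hj
    rw [List.foldl_cons]
    rcases List.mem_cons.1 hj with rfl | hj'
    · rw [pv_jfold_get?_not_mem dic i t _ j (List.nodup_cons.1 hnd).1]
      exact PySem.Dict.get?_insert_self _ _ _
    · have hne : j ≠ a := fun h => (List.nodup_cons.1 hnd).1 (h ▸ hj')
      rw [ih _ _ (List.nodup_cons.1 hnd).2 hj']
      have hgd : (pvAJ (pvDic dic) i d a).getD j PySem.Dict.empty = d.getD j PySem.Dict.empty :=
        PySem.Dict.getD_insert_of_ne _ _ _ hne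
      rw [hgd]

-- J3: the j-fold over keys already present does not change the key list
theorem pv_jfold_keys (dic : List (String × List (String × Int))) (i : String)
    (t : List String) (d : PySem.Dict String (PySem.Dict String Int)) (h : ∀ j ∈ t, j ∈ d.keys) :
    (t.foldl (pvAJ (pvDic dic) i) d).keys = d.keys := by
  have hk : (List.foldl (fun d x => d.insert x ((d.getD x PySem.Dict.empty).insert i
      (((pvDic dic).getD i PySem.Dict.empty).getD x 0))) d t).keys = PySem.Set.update d.keys t :=
    PySem.Dict.keys_foldl_insert t _ d
  have he : (t.foldl (pvAJ (pvDic dic) i) d) = (List.foldl (fun d x => d.insert x ((d.getD x PySem.Dict.empty).insert i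
      (((pvDic dic).getD i PySem.Dict.empty).getD x 0))) d t) := rfl
  rw [he, hk, PySem.Set.update_eq_append_filter]
  have : List.filter (fun y => !PySem.Set.contains d.keys y) (PySem.Set.ofList t) = [] := by
    rw [List.filter_eq_nil_iff]
    intro y hy
    simpa using h y ((PySem.Set.mem_ofList t y).1 hy)
  rw [this, List.append_nil]

-- R1: row fold does not touch keys outside `order`
theorem pv_rowfold_get?_not_mem (dic : List (String × List (String × Int))) (j : String) :
    ∀ (os : List String) (r : PySem.Dict String Int) (y : String), y ∉ os →
      (os.foldl (pvRStep dic j) r).get? y = r.get? y := by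
  intro os
  induction os with
  | nil => intro r y _; rfl
  | cons a os ih =>
    intro r y hy
    rw [List.foldl_cons, ih _ _ (fun h => hy (List.mem_cons_of_mem _ h))]
    unfold pvRStep
    split
    · exact PySem.Dict.get?_insert_of_ne _ _ (fun h => hy (h ▸ List.mem_cons_self))
    · rfl

-- R2: key i ∈ order with i adjacent to j holds the weight dic[i][j]
theorem pv_rowfold_get?_mem (dic : List (String × List (String × Int))) (j : String) :
    ∀ (os : List String) (r : PySem.Dict String Int) (i : String), os.Nodup → i ∈ os →
      ((pvDic dic).getD i PySem.Dict.empty).contains j = true →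
      (os.foldl (pvRStep dic j) r).get? i = some (((pvDic dic).getD i PySem.Dict.empty).getD j 0) := by
  intro os
  induction os with
  | nil => intro r i _ h; cases h
  | cons a os ih =>
    intro r i hnd hi hc
    rw [List.foldl_cons]
    rcases List.mem_cons.1 hi with rfl | hi'
    · rw [pv_rowfold_get?_not_mem dic j os _ i (List.nodup_cons.1 hnd).1]
      unfold pvRStep
      rw [if_pos hc]
      exact PySem.Dict.get?_insert_self _ _ _
    · exact ih _ i (List.nodup_cons.1 hnd).2 hi' hc

-- R3: row folds keep keys duplicate-free
theorem pv_rowfold_nodup (dic : List (String × List (String × Int))) (j : String) :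
    ∀ (os : List String) (r : PySem.Dict String Int), r.keys.Nodup →
      (os.foldl (pvRStep dic j) r).keys.Nodup := by
  intro os
  induction os with
  | nil => intro r h; exact h
  | cons a os ih =>
    intro r h
    rw [List.foldl_cons]
    apply ih
    unfold pvRStep
    split
    · exact PySem.Dict.nodup_keys_insert _ _ _ h
    · exact h

-- R4: appending one accepted bridge to `order` extends a core row by at most one entry
theorem pv_row_snoc (gene_list : List String) (dic : List (String × List (String × Int)))
    (order : List String) (i j : String) :
    pvRow gene_list dic (order ++ [i]) j
      = if ((pvDic dic).getD i PySem.Dict.empty).contains j then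
          (pvRow gene_list dic order j).insert i (((pvDic dic).getD i PySem.Dict.empty).getD j 0)
        else pvRow gene_list dic order j := by
  unfold pvRow
  rw [List.foldl_append]
  rfl

-- the model: A's dic_f state is fully determined by the list of bridges accepted so far
def pvMod (gene_list : List String) (dic : List (String × List (String × Int)))
    (df : PySem.Dict String (PySem.Dict String Int)) (order : List String) : Prop :=
  df.keys = pvCore gene_list dic ++ order ∧
  df.keys.Nodup ∧
  (∀ j ∈ pvCore gene_list dic, df.get? j = some (pvRow gene_list dic order j)) ∧
  (∀ i ∈ order, i ∉ pvCore gene_list dic ∧ df.get? i = some (pvV gene_list dic i))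

theorem pv_order_nodup (gene_list : List String) (dic : List (String × List (String × Int)))
    (df : PySem.Dict String (PySem.Dict String Int)) (order : List String)
    (h : pvMod gene_list dic df order) : order.Nodup :=
  (h.1 ▸ h.2.1).sublist (List.sublist_append_right _ _)

-- re-accepting an already accepted bridge is the identity (A's redundant re-assignments)
theorem pv_satStep (gene_list : List String) (dic : List (String × List (String × Int))) (i : String)
    (df : PySem.Dict String (PySem.Dict String Int)) (order : List String) (proc : List String)
    (hMod : pvMod gene_list dic df order) (hio : i ∈ order) :
    pvAI gene_list dic proc df i = df := by
  obtain ⟨hkeys, hnd, hcore, hacc⟩ := hMod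
  obtain ⟨hic, hv⟩ := hacc i hio
  have hond : order.Nodup := pv_order_nodup gene_list dic df order ⟨hkeys, hnd, hcore, hacc⟩
  unfold pvAI
  split
  · show List.foldl (pvAJ (pvDic dic) i) (df.insert i (pvV gene_list dic i)) (pvV gene_list dic i).keys = df
    have hins : df.insert i (pvV gene_list dic i) = df := pv_insert_same df i _ hnd hv
    have hfold : ∀ (t : List String), (∀ j ∈ t, j ∈ pvT gene_list dic i) →
        t.foldl (pvAJ (pvDic dic) i) df = df := by
      intro t
      induction t with
      | nil => intro _; rfl
      | cons a t ih =>
        intro ht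
        have haT := ht a List.mem_cons_self
        obtain ⟨hak, hacore⟩ := (pv_mem_T_iff gene_list dic i a).1 haT
        have hrow := hcore a hacore
        have hcontains : ((pvDic dic).getD i PySem.Dict.empty).contains a = true := by
          rw [PySem.Dict.contains_iff_mem_keys]; exact hak
        have hrownd : (pvRow gene_list dic order a).keys.Nodup :=
          pv_rowfold_nodup dic a order _ (PySem.Dict.nodup_keys_ofList _)
        have hrowget : (pvRow gene_list dic order a).get? i = some ((pvW dic i).getD a 0) :=
          pv_rowfold_get?_mem dic a order _ i hond hio hcontains
        have hstep : pvAJ (pvDic dic) i df a = df := by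
          show df.insert a ((df.getD a PySem.Dict.empty).insert i ((pvW dic i).getD a 0)) = df
          rw [PySem.Dict.getD_of_get?_eq_some _ _ hrow,
            pv_insert_same (pvRow gene_list dic order a) i _ hrownd hrowget,
            pv_insert_same df a _ hnd hrow]
        rw [List.foldl_cons, hstep]
        exact ih (fun j hj => ht j (List.mem_cons_of_mem _ hj))
    rw [hins]
    exact hfold _ (fun j hj => (pv_V_keys gene_list dic i) ▸ hj)
  · rfl

-- accepting a fresh bridge i turns the model for `order` into the model for `order ++ [i]`
theorem pv_acceptStep (gene_list : List String) (dic : List (String × List (String × Int))) (i : String)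
    (df : PySem.Dict String (PySem.Dict String Int)) (order : List String)
    (hMod : pvMod gene_list dic df order) (hic : i ∉ pvCore gene_list dic) (hio : i ∉ order) :
    pvMod gene_list dic ((pvT gene_list dic i).foldl (pvAJ (pvDic dic) i) (df.insert i (pvV gene_list dic i))) (order ++ [i]) := by
  obtain ⟨hkeys, hnd, hcore, hacc⟩ := hMod
  have hik : i ∉ df.keys := by
    rw [hkeys]; intro h
    rcases List.mem_append.1 h with h | h
    · exact hic h
    · exact hio h
  have hnc : df.contains i = false := by
    cases hc : df.contains i
    · rfl
    · exact absurd ((PySem.Dict.contains_iff_mem_keys df i).1 hc) hik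
  have hd1keys : (df.insert i (pvV gene_list dic i)).keys = df.keys ++ [i] :=
    PySem.Dict.keys_insert_of_not_contains df _ hnc
  have hTd1 : ∀ j ∈ pvT gene_list dic i, j ∈ (df.insert i (pvV gene_list dic i)).keys := by
    intro j hj
    rw [hd1keys]
    apply List.mem_append_left
    rw [hkeys]
    exact List.mem_append_left _ ((pv_mem_T_iff gene_list dic i j).1 hj).2
  have hfkeys : ((pvT gene_list dic i).foldl (pvAJ (pvDic dic) i) (df.insert i (pvV gene_list dic i))).keys
      = df.keys ++ [i] := by
    rw [pv_jfold_keys dic i _ _ hTd1, hd1keys]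
  have hiT : i ∉ pvT gene_list dic i := fun h => hic ((pv_mem_T_iff gene_list dic i i).1 h).2
  refine ⟨?_, ?_, ?_, ?_⟩
  · rw [hfkeys, hkeys, List.append_assoc]
  · rw [hfkeys, ← hd1keys]
    exact PySem.Dict.nodup_keys_insert _ _ _ hnd
  · intro j hj
    have hji : j ≠ i := fun h => hic (h ▸ hj)
    by_cases hjT : j ∈ pvT gene_list dic i
    · have hcontains : ((pvDic dic).getD i PySem.Dict.empty).contains j = true := by
        rw [PySem.Dict.contains_iff_mem_keys]
        exact ((pv_mem_T_iff gene_list dic i j).1 hjT).1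
      rw [pv_jfold_get?_mem dic i _ _ j (pv_T_nodup gene_list dic i) hjT,
        PySem.Dict.getD_insert_of_ne _ _ _ hji,
        PySem.Dict.getD_of_get?_eq_some _ _ (hcore j hj),
        pv_row_snoc, if_pos hcontains]
    · have hcontains : ((pvDic dic).getD i PySem.Dict.empty).contains j = false := by
        cases hc : ((pvDic dic).getD i PySem.Dict.empty).contains j
        · rfl
        · exact absurd ((pv_mem_T_iff gene_list dic i j).2
            ⟨(PySem.Dict.contains_iff_mem_keys _ _).1 hc, hj⟩) hjT
      rw [pv_jfold_get?_not_mem dic i _ _ _ hjT,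
        PySem.Dict.get?_insert_of_ne _ _ hji, hcore j hj,
        pv_row_snoc, if_neg (by simp [hcontains])]
  · intro i' hi'
    rcases List.mem_append.1 hi' with hi'o | hi'new
    · obtain ⟨hi'c, hv⟩ := hacc i' hi'o
      have hne : i' ≠ i := fun h => hio (h ▸ hi'o)
      have hi'T : i' ∉ pvT gene_list dic i := fun h => hi'c ((pv_mem_T_iff gene_list dic i i').1 h).2
      refine ⟨hi'c, ?_⟩
      rw [pv_jfold_get?_not_mem dic i _ _ _ hi'T, PySem.Dict.get?_insert_of_ne _ _ hne, hv]
    · have hii : i' = i := by simpa using hi'new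
      rw [hii]
      refine ⟨hic, ?_⟩
      rw [pv_jfold_get?_not_mem dic i _ _ _ hiT]
      exact PySem.Dict.get?_insert_self _ _ _

-- the inner loops of A and B advance the same model together
theorem pv_loop2 (gene_list : List String) (dic : List (String × List (String × Int))) (gene : String) :
    ∀ (L : List String) (df : PySem.Dict String (PySem.Dict String Int)) (order : List String),
      pvMod gene_list dic df order →
      pvMod gene_list dic
        ((L.filter (fun x => !(pvDic0 gene_list dic).keys.contains x)).foldl
          (pvAI gene_list dic ((pvDic0 gene_list dic).keys.erase gene)) df)
        (L.foldl (pvP1I gene_list dic gene) order) := by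
  intro L
  induction L with
  | nil => intro df order h; exact h
  | cons x L ih =>
    intro df order hMod
    by_cases hxc : x ∈ pvCore gene_list dic
    · have hpc : (pvDic0 gene_list dic).keys.contains x = true := by
        rw [pv_keys0]; exact List.contains_iff_mem.2 hxc
      have hgate : (PySem.Set.ofList (pvCore gene_list dic)).contains x = true :=
        (PySem.Set.contains_iff _ _).2 ((PySem.Set.mem_ofList _ _).2 hxc)
      have hB : pvP1I gene_list dic gene order x = order := by
        unfold pvP1I; rw [hgate]; simp
      have hfilter : (x :: L).filter (fun x => !(pvDic0 gene_list dic).keys.contains x)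
          = L.filter (fun x => !(pvDic0 gene_list dic).keys.contains x) := by
        rw [List.filter_cons, hpc]; simp
      rw [hfilter, List.foldl_cons, hB]
      exact ih df order hMod
    · have hpc : (pvDic0 gene_list dic).keys.contains x = false := by
        rw [pv_keys0]; exact Bool.eq_false_iff.mpr (fun h => hxc (List.contains_iff_mem.1 h))
      have hgate : (PySem.Set.ofList (pvCore gene_list dic)).contains x = false :=
        Bool.eq_false_iff.mpr (fun h => hxc ((PySem.Set.mem_ofList _ _).1 ((PySem.Set.contains_iff _ _).1 h)))
      have hfilter : (x :: L).filter (fun x => !(pvDic0 gene_list dic).keys.contains x)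
          = x :: L.filter (fun x => !(pvDic0 gene_list dic).keys.contains x) := by
        rw [List.filter_cons, hpc]; simp
      rw [hfilter, List.foldl_cons, List.foldl_cons]
      by_cases hxo : x ∈ order
      · have hxcont : order.contains x = true := List.contains_iff_mem.2 hxo
        have hB : pvP1I gene_list dic gene order x = order := by
          unfold pvP1I; rw [hgate, hxcont]; simp
        rw [hB, pv_satStep gene_list dic x df order _ hMod hxo]
        exact ih df order hMod
      · have hxcont : order.contains x = false :=
          Bool.eq_false_iff.mpr (fun h => hxo (List.contains_iff_mem.1 h))
        cases hcond : (pvT gene_list dic x).any (fun j => j != gene) with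
        | false =>
          have hA : pvAI gene_list dic ((pvDic0 gene_list dic).keys.erase gene) df x = df := by
            unfold pvAI
            rw [if_neg]
            intro h
            rw [(pv_cond_iff gene_list dic x gene)] at h
            rw [h] at hcond; cases hcond
          have hB : pvP1I gene_list dic gene order x = order := by
            unfold pvP1I; rw [hgate, hxcont, hcond]; simp
          rw [hA, hB]
          exact ih df order hMod
        | true =>
          have hA : pvAI gene_list dic ((pvDic0 gene_list dic).keys.erase gene) df x
              = (pvT gene_list dic x).foldl (pvAJ (pvDic dic) x) (df.insert x (pvV gene_list dic x)) := by
            unfold pvAI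
            rw [if_pos ((pv_cond_iff gene_list dic x gene).2 hcond)]
            show List.foldl (pvAJ (pvDic dic) x) ((df.insert x (pvV gene_list dic x))) (pvV gene_list dic x).keys = _
            rw [pv_V_keys]
          have hB : pvP1I gene_list dic gene order x = order ++ [x] := by
            unfold pvP1I; rw [hgate, hxcont, hcond]; simp
          rw [hA, hB]
          exact ih _ _ (pv_acceptStep gene_list dic x df order hMod hxc hxo)

theorem pv_outer (gene_list : List String) (dic : List (String × List (String × Int))) :
    ∀ (G : List String) (df : PySem.Dict String (PySem.Dict String Int)) (order : List String),
      pvMod gene_list dic df order →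
      pvMod gene_list dic (G.foldl (pvAG gene_list dic) df)
        (G.foldl (fun o g => ((pvDic dic).getD g PySem.Dict.empty).keys.foldl (pvP1I gene_list dic g) o) order) := by
  intro G
  induction G with
  | nil => intro df order h; exact h
  | cons gene G ih =>
    intro df order hMod
    rw [List.foldl_cons, List.foldl_cons]
    exact ih _ _ (pv_loop2 gene_list dic gene _ df order hMod)

-- the dist==0 construction agrees (A reads dic0, B reads dic; they agree on core keys)
theorem pv_phase0 (gene_list : List String) (dic : List (String × List (String × Int))) :
    (pvDic0 gene_list dic).keys.foldl (fun df k =>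
        df.insert k (PySem.Dict.ofList (((pvDic0 gene_list dic).getD k PySem.Dict.empty).items.filter
          (fun x => gene_list.contains x.1)))) PySem.Dict.empty
      = (pvCore gene_list dic).foldl (fun df k => df.insert k (pvBase gene_list dic k)) PySem.Dict.empty := by
  rw [pv_keys0]
  apply PySem.List.foldl_congr_mem
  intro acc k hk
  have hck : gene_list.contains k = true := (List.mem_filter.1 hk).2
  unfold pvBase
  rw [PySem.Dict.getD_eq_get?_getD, PySem.Dict.getD_eq_get?_getD, pv_get0 gene_list dic k hck]

theorem pv_base_items (gene_list : List String) (dic : List (String × List (String × Int))) :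
    ((pvCore gene_list dic).foldl (fun df k => df.insert k (pvBase gene_list dic k)) PySem.Dict.empty).items
      = (pvCore gene_list dic).map (fun k => (k, pvBase gene_list dic k)) := by
  have := PySem.Dict.items_foldl_insert_fresh (l := pvCore gene_list dic) (k := id)
    (v := fun k => pvBase gene_list dic k)
    (d := PySem.Dict.empty) (by intro a _; exact PySem.Dict.contains_empty a)
    (by rw [List.map_id]; exact pv_core_nodup gene_list dic)
  simpa using this

theorem pv_mod_init (gene_list : List String) (dic : List (String × List (String × Int))) :
    pvMod gene_list dic
      ((pvCore gene_list dic).foldl (fun df k => df.insert k (pvBase gene_list dic k)) PySem.Dict.empty) [] := by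
  have hitems := pv_base_items gene_list dic
  have hkeys : ((pvCore gene_list dic).foldl (fun df k => df.insert k (pvBase gene_list dic k)) PySem.Dict.empty).keys
      = pvCore gene_list dic := by
    have h2 := congrArg (List.map (fun x : String × PySem.Dict String Int => x.1)) hitems
    rw [List.map_map] at h2
    exact h2.trans (List.map_id _)
  refine ⟨by rw [hkeys, List.append_nil], ?_, ?_, ?_⟩
  · rw [hkeys]; exact pv_core_nodup gene_list dic
  · intro j hj
    have hmem : (j, pvBase gene_list dic j)
        ∈ ((pvCore gene_list dic).foldl (fun df k => df.insert k (pvBase gene_list dic k)) PySem.Dict.empty).items := by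
      rw [hitems]; exact List.mem_map.2 ⟨j, hj, rfl⟩
    exact PySem.Dict.get?_of_mem_items _ hmem (by rw [hkeys]; exact pv_core_nodup gene_list dic)
  · intro i hi; cases hi

theorem represent_network_agree (gene_list : List String) (dic : List (String × List (String × Int))) (dist : Int) :
    represent_network gene_list dic dist = represent_network_alt gene_list dic dist := by
  by_cases hdist : dist = 1
  · subst hdist
    simp only [represent_network, represent_network_alt]
    rw [if_pos (by decide), if_neg (by decide), pv_phase0, pv_keys0]
    set order := (pvCore gene_list dic).foldl
      (fun o g => ((pvDic dic).getD g PySem.Dict.empty).keys.foldl (pvP1I gene_list dic g) o) [] with horder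
    set dfF := (pvCore gene_list dic).foldl (pvAG gene_list dic)
      ((pvCore gene_list dic).foldl (fun df k => df.insert k (pvBase gene_list dic k)) PySem.Dict.empty) with hdfF
    obtain ⟨hkeys, hnd, hcore, hacc⟩ :=
      pv_outer gene_list dic (pvCore gene_list dic) _ [] (pv_mod_init gene_list dic)
    have hond : order.Nodup :=
      pv_order_nodup gene_list dic dfF order ⟨hkeys, hnd, hcore, hacc⟩
    -- B's out dict: items after the two fresh-key folds
    set out := (pvCore gene_list dic).foldl (fun d j => d.insert j (pvRow gene_list dic order j)) PySem.Dict.empty with hout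
    have houtItems : out.items = (pvCore gene_list dic).map (fun j => (j, pvRow gene_list dic order j)) := by
      have := PySem.Dict.items_foldl_insert_fresh (l := pvCore gene_list dic) (k := id)
        (v := fun j => pvRow gene_list dic order j)
        (d := PySem.Dict.empty) (by intro a _; exact PySem.Dict.contains_empty a)
        (by rw [List.map_id]; exact pv_core_nodup gene_list dic)
      simpa using this
    have houtKeys : out.keys = pvCore gene_list dic := by
      have h2 := congrArg (List.map (fun x : String × PySem.Dict String Int => x.1)) houtItems
      rw [List.map_map] at h2
      exact h2.trans (List.map_id _)
    have hout2Items : (order.foldl (fun d i => d.insert i (pvBridgeRow gene_list dic i)) out).items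
        = out.items ++ order.map (fun i => (i, pvBridgeRow gene_list dic i)) := by
      have := PySem.Dict.items_foldl_insert_fresh (l := order) (k := id)
        (v := fun i => pvBridgeRow gene_list dic i) (d := out)
        (by intro a ha
            show out.contains a = false
            cases hc : out.contains a
            · rfl
            · exact absurd (houtKeys ▸ (PySem.Dict.contains_iff_mem_keys out a).1 hc) (hacc a ha).1)
        (by rw [List.map_id]; exact hond)
      simpa using this
    -- A's final dict has exactly those items
    have hAitems : dfF.items = (pvCore gene_list dic).map (fun j => (j, pvRow gene_list dic order j))
        ++ order.map (fun i => (i, pvBridgeRow gene_list dic i)) := by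
      rw [PySem.Dict.items_eq_map_keys dfF hnd PySem.Dict.empty, hkeys, List.map_append]
      congr 1
      · apply List.map_congr_left
        intro j hj
        rw [PySem.Dict.getD_of_get?_eq_some _ _ (hcore j hj)]
      · apply List.map_congr_left
        intro i hi
        rw [PySem.Dict.getD_of_get?_eq_some _ _ (hacc i hi).2, pv_bridgeRow_eq_V]
    have : dfF = order.foldl (fun d i => d.insert i (pvBridgeRow gene_list dic i)) out := by
      apply PySem.Dict.ext
      rw [hAitems, hout2Items, houtItems]
    rw [this]
  · simp only [represent_network, represent_network_alt]
    rw [if_neg (by simpa using hdist), if_pos hdist, pv_phase0]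

-- ===== VERDICT (by name: the statement is the Claim_ definition above) =====
theorem represent_network_spec : Claim_equal_represent_network := by
  intro gene_list dic dist _ _
  unfold Spec_represent_network
  exact represent_network_agree gene_list dic dist
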